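-- pv_equiv track=rewrite | github.com/valyriouc/Discord | common/credentials.py | __reading_block
-- ===== SOURCE A (Python) =====
-- def __reading_block(reading: list[str]) -> dict:
--     block = {}
--     offset = 0
--     if reading[0] != "---":
--         raise ValueError("Expected block start (---)")
--     offset += 1
--     for it in range(1, len(reading)):
--         if reading[it] == "---":
--             offset += 1
--             break
--         if (reading[it] == ""):
--             offset += 1
--             continue
--         splited = reading[it].split(":", 1)
--         block[splited[0]] = splited[1].strip()
--         offset += 1
--     return (block, offset)
-- ===== SOURCE B (Python) =====
-- def __reading_block(reading: list[str]) -> dict: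
--     if reading[0] != "---":
--         raise ValueError("Expected block start (---)")
--     tail = reading[1:]
--     try:
--         j = 1 + tail.index("---")
--     except ValueError:
--         j = len(reading)
--     block = {k: v.strip() for k, v in
--              (line.split(":", 1) for line in reading[1:j] if line != "")}
--     return (block, j + 1 if j < len(reading) else len(reading))
-- ===== Notes on version B (the rewrite author's own statement) =====
-- stated objective: simpler
-- what changed: B first locates the closing '---' with list.index on the tail, builds the dict in one comprehension over the slice before it, and computes the offset arithmetically from the boundary position, replacing A's index loop with break/continue and a running offset counter.
import Mathlib
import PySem

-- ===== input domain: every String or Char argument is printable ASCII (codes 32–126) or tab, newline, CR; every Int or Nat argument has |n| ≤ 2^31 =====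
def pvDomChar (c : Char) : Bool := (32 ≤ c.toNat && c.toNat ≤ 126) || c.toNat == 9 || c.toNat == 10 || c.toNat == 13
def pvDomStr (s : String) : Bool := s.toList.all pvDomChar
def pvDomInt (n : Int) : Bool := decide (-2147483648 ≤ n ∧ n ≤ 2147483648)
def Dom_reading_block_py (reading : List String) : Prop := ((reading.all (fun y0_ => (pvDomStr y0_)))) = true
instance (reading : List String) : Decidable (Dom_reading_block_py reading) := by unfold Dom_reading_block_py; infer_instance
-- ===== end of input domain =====

-- B replaces A's single counting loop by: locate the closing "---" first (list.index), then build
-- the dict from the slice before it in one comprehension and compute the offset arithmetically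
-- (objective: simpler decomposition, same cost).

-- ===== PORT A =====
-- the for-loop over range(1, len(reading)): index counter `it`, early break on "---"
def pvLoopA (reading : List String) (n : Nat) (block : PySem.Dict String String)
    (offset : Int) (it : Nat) : (PySem.Dict String String) × Int :=
  if _h : it < n then
    let line := PySem.List.pyGetD reading (it : Int) ""
    if line == "---" then (block, offset + 1)
    else if line == "" then pvLoopA reading n block (offset + 1) (it + 1)
    else
      let splited := (PySem.Str.splitMax? line ":" 1).getD []
      pvLoopA reading n
        (block.insert (PySem.List.pyGetD splited 0 "")
          (PySem.Str.strip (PySem.List.pyGetD splited 1 ""))) (offset + 1) (it + 1)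
  else (block, offset)
termination_by n - it

def reading_block_py (reading : List String) : (List (String × String)) × Int :=
  if PySem.List.pyGetD reading 0 "" != "---" then ([], 0)  -- ValueError/IndexError: outside Pre_
  else
    let r := pvLoopA reading reading.length PySem.Dict.empty 1 1
    (r.1.items, r.2)

-- ===== PORT B =====
def reading_block_py_alt (reading : List String) : (List (String × String)) × Int :=
  if PySem.List.pyGetD reading 0 "" != "---" then ([], 0)  -- ValueError/IndexError: outside Pre_
  else
    let n : Int := reading.length
    let tail := PySem.List.slice reading (some 1) none
    let j : Int :=
      match PySem.List.index? tail "---" with  -- try: 1 + tail.index("---") except ValueError: n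
      | some k => 1 + (k : Int)
      | none => n
    let lines := PySem.List.slice reading (some 1) (some j)
    let block :=
      ((lines.filter (fun l => l != "")).map
        (fun line => (PySem.Str.splitMax? line ":" 1).getD [])).foldl
        (fun d p => d.insert (PySem.List.pyGetD p 0 "")
          (PySem.Str.strip (PySem.List.pyGetD p 1 ""))) PySem.Dict.empty
    (block.items, if j < n then j + 1 else n)

-- ===== PRECONDITION & SPEC =====
-- Pre_ excludes exactly the inputs where A raises: empty input / wrong first line (ValueError or
-- IndexError), and any non-empty line before the closing "---" without a ':' (IndexError).
def Pre_reading_block_py (reading : List String) : Prop :=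
  reading.head? = some "---" ∧
  ∀ line ∈ (reading.tail.takeWhile (fun l => l ≠ "---")), line ≠ "" → ':' ∈ line.toList
instance (reading : List String) : Decidable (Pre_reading_block_py reading) := by
  unfold Pre_reading_block_py; infer_instance

def pvWitness_reading_block_py : List String := ["---", "name: disc", "", "id:7", "---", "rest"]

def Spec_reading_block_py (reading : List String) (out : (List (String × String)) × Int) : Prop := out = reading_block_py_alt reading
instance (reading : List String) (out : (List (String × String)) × Int) : Decidable (Spec_reading_block_py reading out) := by unfold Spec_reading_block_py; infer_instance

-- ===== CLAIM (what is proved, stated in full; the proofs are below) =====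
def Claim_equal_reading_block_py : Prop := ∀ (reading : List String), Dom_reading_block_py reading → Pre_reading_block_py reading → Spec_reading_block_py reading (reading_block_py reading)

-- ===== LEMMAS AND PROOFS =====

-- the per-line dict update both Pythons perform (line.split(":", 1); strip the value; assign)
def pvStep (d : PySem.Dict String String) (line : String) : PySem.Dict String String :=
  let p := (PySem.Str.splitMax? line ":" 1).getD []
  d.insert (PySem.List.pyGetD p 0 "") (PySem.Str.strip (PySem.List.pyGetD p 1 ""))

-- A's loop, re-expressed structurally over the list of remaining lines
def pvLoopL : List String → PySem.Dict String String → Int → (PySem.Dict String String) × Int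
  | [], b, o => (b, o)
  | line :: rest, b, o =>
    if line == "---" then (b, o + 1)
    else if line == "" then pvLoopL rest b (o + 1)
    else pvLoopL rest (pvStep b line) (o + 1)

lemma pvLoopA_eq_pvLoopL_fuel (reading : List String) :
    ∀ d it b o, reading.length - it ≤ d →
      pvLoopA reading reading.length b o it = pvLoopL (reading.drop it) b o := by
  intro d
  induction d with
  | zero =>
    intro it b o hd
    have h : ¬ it < reading.length := by omega
    rw [pvLoopA, dif_neg h, List.drop_eq_nil_of_le (by omega)]
    rfl
  | succ d ih =>
    intro it b o hd
    by_cases h : it < reading.length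
    · have hget : PySem.List.pyGetD reading (it : Int) "" = reading[it] := by
        rw [PySem.List.pyGetD_natCast]
        exact List.getD_eq_getElem _ _ h
      rw [pvLoopA, dif_pos h, List.drop_eq_getElem_cons h]
      simp only [hget, pvLoopL, pvStep]
      by_cases h1 : reading[it] = "---"
      · simp [h1]
      · by_cases h2 : reading[it] = ""
        · simpa [h1, h2] using ih (it + 1) b (o + 1) (by omega)
        · simpa [h1, h2] using ih (it + 1) _ (o + 1) (by omega)
    · rw [pvLoopA, dif_neg h, List.drop_eq_nil_of_le (by omega)]
      rfl

lemma pvLoopA_eq_pvLoopL (reading : List String) (it : Nat) (b : PySem.Dict String String)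
    (o : Int) : pvLoopA reading reading.length b o it = pvLoopL (reading.drop it) b o :=
  pvLoopA_eq_pvLoopL_fuel reading (reading.length - it) it b o (le_refl _)

-- A's loop characterised through list.index: dict built from the lines before the first "---",
-- offset = position of the boundary + 1 (or the whole length if there is none)
lemma pvLoopL_char (tail : List String) :
    ∀ b o, pvLoopL tail b o =
      match PySem.List.index? tail "---" with
      | some k => (((tail.take k).filter (fun l => l != "")).foldl pvStep b, o + (k : Int) + 1)
      | none => ((tail.filter (fun l => l != "")).foldl pvStep b, o + (tail.length : Int)) := by
  induction tail with
  | nil =>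
    intro b o
    have hnone : PySem.List.index? ([] : List String) "---" = none := by
      rw [PySem.List.index?_eq_none_iff]; simp
    rw [hnone]
    simp [pvLoopL]
  | cons line rest ih =>
    intro b o
    by_cases hb : line = "---"
    · subst hb
      rw [PySem.List.index?_cons_self]
      simp [pvLoopL]
    · rw [PySem.List.index?_cons_of_ne rest hb]
      have c1 : (line == "---") = false := by simpa using hb
      cases hk : PySem.List.index? rest "---" with
      | some k =>
        simp only [Option.map_some]
        by_cases he : line = ""
        · subst he
          simp only [pvLoopL, c1, Bool.false_eq_true, if_false]
          rw [ih, hk]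
          simp only [List.take_succ_cons, List.filter_cons]
          norm_num
          ring
        · have c2 : (line == "") = false := by simpa using he
          simp only [pvLoopL, c1, c2, Bool.false_eq_true, if_false]
          rw [ih, hk]
          simp only [List.take_succ_cons, List.filter_cons]
          have hf : (line != "") = true := by simpa using he
          rw [hf]
          simp only [if_true, List.foldl_cons, Prod.mk.injEq]
          exact ⟨by trivial, by push_cast; ring⟩
      | none =>
        simp only [Option.map_none]
        by_cases he : line = ""
        · subst he
          simp only [pvLoopL, c1, Bool.false_eq_true, if_false]
          rw [ih, hk]
          simp only [List.filter_cons, List.length_cons]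
          norm_num
          ring
        · have c2 : (line == "") = false := by simpa using he
          simp only [pvLoopL, c1, c2, Bool.false_eq_true, if_false]
          rw [ih, hk]
          simp only [List.filter_cons, List.length_cons]
          have hf : (line != "") = true := by simpa using he
          rw [hf]
          simp only [if_true, List.foldl_cons, Prod.mk.injEq]
          exact ⟨by trivial, by push_cast; ring⟩

lemma pv_index?_lt_length {α : Type} [BEq α] [LawfulBEq α] {xs : List α} {v : α} {k : Nat}
    (h : PySem.List.index? xs v = some k) : k < xs.length := by
  obtain ⟨hk, -, -⟩ := PySem.List.getElem_of_index?_eq_some h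
  exact hk

-- the map/foldl comprehension of B is exactly a fold of pvStep
lemma pv_fold_map (l : List String) (b : PySem.Dict String String) :
    ((l.map (fun line => (PySem.Str.splitMax? line ":" 1).getD [])).foldl
      (fun d p => d.insert (PySem.List.pyGetD p 0 "")
        (PySem.Str.strip (PySem.List.pyGetD p 1 ""))) b) = l.foldl pvStep b := by
  rw [List.foldl_map]
  rfl

-- ===== VERDICT (by name: the statement is the Claim_ definition above) =====
theorem reading_block_py_spec : Claim_equal_reading_block_py := by
  intro reading _hdom hpre
  obtain ⟨hhead, -⟩ := hpre
  obtain ⟨line0, tail, rfl⟩ : ∃ l t, reading = l :: t := by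
    cases reading with
    | nil => simp at hhead
    | cons a t => exact ⟨a, t, rfl⟩
  have hl0 : line0 = "---" := by simpa using hhead
  subst hl0
  unfold Spec_reading_block_py reading_block_py reading_block_py_alt
  have hguard : (PySem.List.pyGetD ("---" :: tail) 0 "" != "---") = false := by
    rw [PySem.List.pyGetD_zero_cons]
    rfl
  rw [hguard]
  simp only [Bool.false_eq_true, if_false]
  have hA : pvLoopA ("---" :: tail) ("---" :: tail).length PySem.Dict.empty 1 1
      = pvLoopL tail PySem.Dict.empty 1 := by
    rw [pvLoopA_eq_pvLoopL]
    rfl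
  rw [hA, pvLoopL_char]
  have htail : PySem.List.slice ("---" :: tail) (some 1) none = tail := by
    simpa using PySem.List.slice_from_natCast ("---" :: tail) 1
  rw [htail]
  cases hk : PySem.List.index? tail "---" with
  | some k =>
    have hklt : k < tail.length := pv_index?_lt_length hk
    dsimp only
    have hc : (1 : Int) + (k : Int) = (k : Int) + 1 := by ring
    simp only [hc]
    have hlines : PySem.List.slice ("---" :: tail) (some (1 : Int)) (some ((k : Int) + 1))
        = tail.take k := by
      have h := PySem.List.slice_natCast ("---" :: tail) 1 (k + 1)
      push_cast at h
      simpa using h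
    rw [hlines, pv_fold_map]
    have hlt : (k : Int) + 1 < (("---" :: tail).length : Int) := by
      simp only [List.length_cons]
      push_cast
      omega
    rw [if_pos hlt]
  | none =>
    dsimp only
    have hlines : PySem.List.slice ("---" :: tail) (some (1 : Int))
        (some ((("---" :: tail).length : Nat) : Int)) = tail := by
      have h := PySem.List.slice_natCast ("---" :: tail) 1 (("---" :: tail).length)
      simpa using h
    rw [hlines, pv_fold_map]
    rw [if_neg (by omega)]
    simp only [Prod.mk.injEq, List.length_cons]
    exact ⟨by trivial, by push_cast; ring⟩
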